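-- pv_equiv track=rewrite | github.com/Yokohama-Miyazawa/EightQueen | eq_gp02.py | no_multiple_queen_in_slash
-- ===== SOURCE A (Python) =====
-- from itertools import combinations
--
-- def get_slashline_cnf_vars(size, cnf_vars, reference_point):
--     (row, column) = reference_point
--     backslashline_cnf_vars = [cnf_vars[row][column]]
--
--     while (row + 1 < size) and (column - 1 >= 0):
--         (row, column)=(row+1, column-1)
--         backslashline_cnf_vars.append(cnf_vars[row][column])
--     (row, column) = reference_point
--     while (row - 1 >= 0) and (column + 1 < size):
--         (row, column)=(row-1, column+1)
--         backslashline_cnf_vars.append(cnf_vars[row][column])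
--
--     return backslashline_cnf_vars
--
-- def no_multiple_queen_in_slash(size, cnf_vars):
--     cnf_line = []
--     for i in range(size):
--         for k in combinations(get_slashline_cnf_vars(size, cnf_vars, (0, i)), 2):
--             cnf_line.append("-" + str(k[0]) + " -" + str(k[1]) + " 0")
--     for j in range(1, size):
--         for l in combinations(get_slashline_cnf_vars(size, cnf_vars, (j, size-1)), 2):
--             cnf_line.append("-" + str(l[0]) + " -" + str(l[1]) + " 0")
--     return cnf_line
-- ===== SOURCE B (Python) =====
-- from itertools import combinations
--
-- def no_multiple_queen_in_slash(size, cnf_vars):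
--     out = []
--     for s in range(2 * size - 1):
--         diag = [cnf_vars[r][s - r] for r in range(size) if 0 <= s - r < size]
--         out.extend("-" + str(a) + " -" + str(b) + " 0" for a, b in combinations(diag, 2))
--     return out
-- ===== Notes on version B (the rewrite author's own statement) =====
-- stated objective: simpler
-- what changed: B replaces A's two border-reference walks (down-left then up-right from each top/right edge cell) with a single ordered traversal of anti-diagonal keys s = 0..2*size-2, collecting each diagonal by a comprehension over rows and emitting combinations per diagonal.
import Mathlib
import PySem

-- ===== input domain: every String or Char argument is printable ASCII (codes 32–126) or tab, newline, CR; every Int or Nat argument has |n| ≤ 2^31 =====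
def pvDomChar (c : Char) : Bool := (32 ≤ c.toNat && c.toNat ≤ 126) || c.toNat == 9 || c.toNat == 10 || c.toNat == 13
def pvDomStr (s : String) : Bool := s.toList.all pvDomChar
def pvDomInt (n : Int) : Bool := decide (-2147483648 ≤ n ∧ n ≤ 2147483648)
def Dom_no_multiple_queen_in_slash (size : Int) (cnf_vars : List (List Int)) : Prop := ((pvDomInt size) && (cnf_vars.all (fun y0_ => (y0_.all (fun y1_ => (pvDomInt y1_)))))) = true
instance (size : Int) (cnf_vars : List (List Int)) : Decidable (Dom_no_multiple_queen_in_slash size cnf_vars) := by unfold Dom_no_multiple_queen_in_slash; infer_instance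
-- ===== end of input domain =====

-- B groups the board cells by anti-diagonal key s = row+col and walks the keys in
-- ascending order, instead of A's two-direction walks from border reference points;
-- objective: simpler (same asymptotic cost). Return-value equivalence; no mutation.

-- ===== PORT A =====
-- cnf_vars[row][col]; indices here are always ≥ 0, in range under Pre_ (default 0 outside)
def pvCell (cnf_vars : List (List Int)) (row col : Int) : Int :=
  PySem.List.pyGetD (PySem.List.pyGetD cnf_vars row []) col 0

-- first while loop of get_slashline_cnf_vars: walk down-left, appending after each step
def pvWalkDL (size : Int) (cnf_vars : List (List Int)) (row col : Int) (acc : List Int) : List Int :=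
  if h : row + 1 < size ∧ col - 1 ≥ 0 then
    pvWalkDL size cnf_vars (row + 1) (col - 1) (acc ++ [pvCell cnf_vars (row + 1) (col - 1)])
  else acc
termination_by col.toNat
decreasing_by omega

-- second while loop: walk up-right from the reference point
def pvWalkUR (size : Int) (cnf_vars : List (List Int)) (row col : Int) (acc : List Int) : List Int :=
  if h : row - 1 ≥ 0 ∧ col + 1 < size then
    pvWalkUR size cnf_vars (row - 1) (col + 1) (acc ++ [pvCell cnf_vars (row - 1) (col + 1)])
  else acc
termination_by row.toNat
decreasing_by omega

def get_slashline_cnf_vars (size : Int) (cnf_vars : List (List Int)) (reference_point : Int × Int) : List Int :=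
  pvWalkUR size cnf_vars reference_point.1 reference_point.2
    (pvWalkDL size cnf_vars reference_point.1 reference_point.2
      [pvCell cnf_vars reference_point.1 reference_point.2])

-- itertools.combinations(xs, 2), in Python's order
def pvCombos2 : List Int → List (Int × Int)
  | [] => []
  | x :: xs => xs.map (fun y => (x, y)) ++ pvCombos2 xs

-- "-" + str(a) + " -" + str(b) + " 0"
def pvFmt (k : Int × Int) : String :=
  "-" ++ PySem.Int.toStr k.1 ++ " -" ++ PySem.Int.toStr k.2 ++ " 0"

def no_multiple_queen_in_slash (size : Int) (cnf_vars : List (List Int)) : List String :=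
  let cnf_line :=
    (PySem.List.pyRange 0 size 1).foldl (fun acc i =>
      (pvCombos2 (get_slashline_cnf_vars size cnf_vars (0, i))).foldl
        (fun a k => a ++ [pvFmt k]) acc) []
  (PySem.List.pyRange 1 size 1).foldl (fun acc j =>
    (pvCombos2 (get_slashline_cnf_vars size cnf_vars (j, size - 1))).foldl
      (fun a l => a ++ [pvFmt l]) acc) cnf_line

-- ===== PORT B =====
-- diag = [cnf_vars[r][s-r] for r in range(size) if 0 <= s-r < size]
def pvDiag (size : Int) (cnf_vars : List (List Int)) (s : Int) : List Int :=
  ((PySem.List.pyRange 0 size 1).filter (fun r => decide (0 ≤ s - r ∧ s - r < size))).map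
    (fun r => pvCell cnf_vars r (s - r))

def no_multiple_queen_in_slash_alt (size : Int) (cnf_vars : List (List Int)) : List String :=
  (PySem.List.pyRange 0 (2 * size - 1) 1).foldl (fun out s =>
    out ++ (pvCombos2 (pvDiag size cnf_vars s)).map pvFmt) []

-- ===== PRECONDITION & SPEC =====
-- Pre_ excludes exactly the inputs where Python A raises IndexError: a positive size
-- with fewer than size rows, or one of the first size rows shorter than size
-- (B raises there too).
def Pre_no_multiple_queen_in_slash (size : Int) (cnf_vars : List (List Int)) : Prop :=
  0 < size → (size ≤ (cnf_vars.length : Int) ∧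
    ∀ row ∈ cnf_vars.take size.toNat, size ≤ (row.length : Int))
instance (size : Int) (cnf_vars : List (List Int)) : Decidable (Pre_no_multiple_queen_in_slash size cnf_vars) := by unfold Pre_no_multiple_queen_in_slash; infer_instance

def pvWitness_no_multiple_queen_in_slash : Int × List (List Int) := (2, [[1, 2], [3, 4]])

def Spec_no_multiple_queen_in_slash (size : Int) (cnf_vars : List (List Int)) (out : List String) : Prop := out = no_multiple_queen_in_slash_alt size cnf_vars
instance (size : Int) (cnf_vars : List (List Int)) (out : List String) : Decidable (Spec_no_multiple_queen_in_slash size cnf_vars out) := by unfold Spec_no_multiple_queen_in_slash; infer_instance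

-- ===== CLAIM (what is proved, stated in full; the proofs are below) =====
def Claim_equal_no_multiple_queen_in_slash : Prop := ∀ (size : Int) (cnf_vars : List (List Int)), Dom_no_multiple_queen_in_slash size cnf_vars → Pre_no_multiple_queen_in_slash size cnf_vars → Spec_no_multiple_queen_in_slash size cnf_vars (no_multiple_queen_in_slash size cnf_vars)

-- ===== LEMMAS AND PROOFS =====

theorem pvRange_shift_map {α : Type} (a b c : Int) (f : Int → α) :
    (PySem.List.pyRange (a + c) (b + c) 1).map f
      = (PySem.List.pyRange a b 1).map (fun x => f (x + c)) := by
  rw [PySem.List.pyRange_one, PySem.List.pyRange_one]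
  have h : (b + c - (a + c)).toNat = (b - a).toNat := by omega
  rw [h, List.map_map, List.map_map]
  refine List.map_congr_left (fun k _ => ?_)
  simp only [Function.comp]
  ring_nf

theorem pvWalkUR_stop (size : Int) (cnf_vars : List (List Int)) (row col : Int)
    (acc : List Int) (h : ¬(row - 1 ≥ 0 ∧ col + 1 < size)) :
    pvWalkUR size cnf_vars row col acc = acc := by
  unfold pvWalkUR
  rw [dif_neg h]

theorem pvWalkDL_eq (size : Int) (cnf_vars : List (List Int)) :
    ∀ (col row : Int) (acc : List Int),
      pvWalkDL size cnf_vars row col acc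
        = acc ++ (PySem.List.pyRange 1 (min (size - row) (col + 1)) 1).map
            (fun t => pvCell cnf_vars (row + t) (col - t)) := by
  intro col
  induction hcol : col.toNat using Nat.strong_induction_on generalizing col with
  | _ n ih =>
    intro row acc
    unfold pvWalkDL
    by_cases h : row + 1 < size ∧ col - 1 ≥ 0
    · rw [dif_pos h]
      rw [ih (col - 1).toNat (by omega) (col - 1) rfl (row + 1)
        (acc ++ [pvCell cnf_vars (row + 1) (col - 1)])]
      have hm : (1 : Int) < min (size - row) (col + 1) := by omega
      rw [PySem.List.pyRange_one_cons hm]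
      simp only [List.map_cons, List.append_assoc, List.singleton_append]
      congr 2
      have h2 : (PySem.List.pyRange (1 + 1) (min (size - row) (col + 1)) 1)
          = PySem.List.pyRange (1 + 1) ((min (size - (row + 1)) ((col - 1) + 1)) + 1) 1 := by
        congr 1 <;> omega
      rw [h2, pvRange_shift_map]
      refine List.map_congr_left (fun t _ => ?_)
      congr 1 <;> omega
    · rw [dif_neg h]
      have : min (size - row) (col + 1) ≤ 1 := by omega
      rw [PySem.List.pyRange_one_eq_nil this]
      simp

-- the filtered-range shape of a diagonal restated as a plain range
theorem pvDiag_eq_range (size : Int) (cnf_vars : List (List Int)) (s lo hi : Int)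
    (hlo : 0 ≤ lo) (hhi : hi ≤ size) (hlh : lo ≤ hi)
    (hiff : ∀ r : Int, 0 ≤ r → r < size → ((0 ≤ s - r ∧ s - r < size) ↔ (lo ≤ r ∧ r < hi))) :
    pvDiag size cnf_vars s
      = (PySem.List.pyRange lo hi 1).map (fun r => pvCell cnf_vars r (s - r)) := by
  unfold pvDiag
  congr 1
  rw [PySem.List.pyRange_one_append 0 lo size hlo (by omega),
      PySem.List.pyRange_one_append lo hi size hlh hhi,
      List.filter_append, List.filter_append]
  rw [List.filter_eq_nil_iff.mpr, List.filter_eq_self.mpr, List.filter_eq_nil_iff.mpr]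
  · simp
  · intro r hr
    rw [PySem.List.mem_pyRange_one] at hr
    simp only [decide_eq_true_eq]
    intro hc
    have := (hiff r (by omega) (by omega)).mp hc
    omega
  · intro r hr
    rw [PySem.List.mem_pyRange_one] at hr
    simp only [decide_eq_true_eq]
    exact (hiff r (by omega) (by omega)).mpr (by omega)
  · intro r hr
    rw [PySem.List.mem_pyRange_one] at hr
    simp only [decide_eq_true_eq]
    intro hc
    have := (hiff r (by omega) (by omega)).mp hc
    omega

-- A's top-edge slashline is B's diagonal i
theorem pvSlash_top (size : Int) (cnf_vars : List (List Int)) (i : Int)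
    (h0 : 0 ≤ i) (hi : i < size) :
    get_slashline_cnf_vars size cnf_vars (0, i) = pvDiag size cnf_vars i := by
  unfold get_slashline_cnf_vars
  rw [pvWalkUR_stop _ _ _ _ _ (by omega), pvWalkDL_eq]
  rw [pvDiag_eq_range size cnf_vars i 0 (i + 1) (by omega) (by omega) (by omega)
    (by intro r h1 h2; omega)]
  rw [PySem.List.pyRange_one_cons (by omega : (0:Int) < i + 1)]
  have h2 : (PySem.List.pyRange (0 + 1) (i + 1) 1)
      = PySem.List.pyRange 1 (min (size - 0) (i + 1)) 1 := by
    congr 1 <;> omega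
  simp only [List.map_cons, List.singleton_append, ← h2]
  congr 1
  · simp [pvCell]
  · refine List.map_congr_left (fun t ht => ?_)
    congr 1 <;> omega

-- A's right-edge slashline (row j) is B's diagonal j + size - 1
theorem pvSlash_right (size : Int) (cnf_vars : List (List Int)) (j : Int)
    (h1 : 1 ≤ j) (hj : j < size) :
    get_slashline_cnf_vars size cnf_vars (j, size - 1)
      = pvDiag size cnf_vars (j + size - 1) := by
  unfold get_slashline_cnf_vars
  rw [pvWalkUR_stop _ _ _ _ _ (by omega), pvWalkDL_eq]
  rw [pvDiag_eq_range size cnf_vars (j + size - 1) j size (by omega) (by omega) (by omega)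
    (by intro r hr1 hr2; omega)]
  rw [PySem.List.pyRange_one_cons (by omega : j < size)]
  have h2 : (PySem.List.pyRange (j + 1) size 1)
      = PySem.List.pyRange (1 + j) ((min (size - j) ((size - 1) + 1)) + j) 1 := by
    congr 1 <;> omega
  simp only [List.map_cons, List.singleton_append]
  congr 1
  · congr 1; omega
  · rw [h2, pvRange_shift_map]
    refine List.map_congr_left (fun t ht => ?_)
    congr 1 <;> omega

-- ===== VERDICT (by name: the statement is the Claim_ definition above) =====
theorem no_multiple_queen_in_slash_spec : Claim_equal_no_multiple_queen_in_slash := by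
  intro size cnf_vars _ _
  unfold Spec_no_multiple_queen_in_slash no_multiple_queen_in_slash no_multiple_queen_in_slash_alt
  simp only [PySem.List.foldl_append_singleton_eq_map, PySem.List.foldl_append_eq_flatMap,
    List.nil_append]
  by_cases hs : size ≤ 0
  · rw [PySem.List.pyRange_one_eq_nil (by omega : size ≤ 0),
        PySem.List.pyRange_one_eq_nil (by omega : size ≤ 1),
        PySem.List.pyRange_one_eq_nil (by omega : 2 * size - 1 ≤ 0)]
    simp
  · push_neg at hs
    rw [PySem.List.pyRange_one_append 0 size (2 * size - 1) (by omega) (by omega),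
        List.flatMap_append]
    congr 1
    · refine List.flatMap_congr (fun i hi => ?_)
      rw [PySem.List.mem_pyRange_one] at hi
      rw [pvSlash_top size cnf_vars i (by omega) (by omega)]
    · have hsh2 : (PySem.List.pyRange size (2 * size - 1) 1)
          = (PySem.List.pyRange 1 size 1).map (fun x => x + (size - 1)) := by
        rw [PySem.List.pyRange_one, PySem.List.pyRange_one, List.map_map]
        have he : (2 * size - 1 - size).toNat = (size - 1).toNat := by omega
        rw [he]
        refine List.map_congr_left (fun k _ => ?_)
        simp only [Function.comp]
        omega
      have hmap : (PySem.List.pyRange size (2 * size - 1) 1).flatMap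
            (fun s => (pvCombos2 (pvDiag size cnf_vars s)).map pvFmt)
          = (PySem.List.pyRange 1 size 1).flatMap
            (fun j => (pvCombos2 (pvDiag size cnf_vars (j + size - 1))).map pvFmt) := by
        rw [hsh2, List.flatMap_map]
        refine List.flatMap_congr (fun j hj => ?_)
        have he : j + (size - 1) = j + size - 1 := by omega
        rw [he]
      rw [hmap]
      refine List.flatMap_congr (fun j hj => ?_)
      rw [PySem.List.mem_pyRange_one] at hj
      rw [pvSlash_right size cnf_vars j (by omega) (by omega)]
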